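-- pv_equiv track=rewrite | github.com/TheJacksonLaboratory/seg-for-4modalities | msUNET/train/util.py | layer_parse
-- ===== SOURCE A (Python) =====
-- def layer_parse(max_trainable_layer, num_layers):
--     # Deprecated
--     # Function that produces a list of entries corresponding to the trainability
--     # of convultional layers in the model
--     layer_trainable = []
--     for i in range(0, num_layers):
--         if i < max_trainable_layer:
--             layer_trainable.append(True)
--         else:
--             layer_trainable.append(False)
--     return layer_trainable
-- ===== SOURCE B (Python) =====
-- def layer_parse(max_trainable_layer, num_layers):
--     t = max(0, min(num_layers, max_trainable_layer))
--     return [True] * t + [False] * (num_layers - t)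
-- ===== Notes on version B (the rewrite author's own statement) =====
-- stated objective: simpler
-- what changed: Replaces the per-index loop with if/else appends by a closed-form clamped count t and list replication [True]*t + [False]*(num_layers-t).
import Mathlib
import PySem

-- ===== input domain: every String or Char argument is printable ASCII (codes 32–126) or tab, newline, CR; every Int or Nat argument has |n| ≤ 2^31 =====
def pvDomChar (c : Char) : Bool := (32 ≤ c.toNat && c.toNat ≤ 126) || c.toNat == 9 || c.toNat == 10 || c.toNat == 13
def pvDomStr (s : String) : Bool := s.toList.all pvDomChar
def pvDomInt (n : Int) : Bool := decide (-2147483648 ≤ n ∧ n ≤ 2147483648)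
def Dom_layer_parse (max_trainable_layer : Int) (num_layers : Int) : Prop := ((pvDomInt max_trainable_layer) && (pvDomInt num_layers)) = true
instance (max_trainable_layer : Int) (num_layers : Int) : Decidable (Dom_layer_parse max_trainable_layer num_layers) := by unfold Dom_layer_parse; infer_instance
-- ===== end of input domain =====

-- B replaces A's per-index loop with a closed-form clamped count plus list replication (objective: simpler).

-- ===== PORT A =====
def layer_parse (max_trainable_layer : Int) (num_layers : Int) : List Bool :=
  (PySem.List.pyRange 0 num_layers 1).foldl
    (fun layer_trainable i =>
      if i < max_trainable_layer then layer_trainable ++ [true] else layer_trainable ++ [false])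
    []

-- ===== PORT B =====
def layer_parse_alt (max_trainable_layer : Int) (num_layers : Int) : List Bool :=
  let t := max 0 (min num_layers max_trainable_layer)
  List.replicate t.toNat true ++ List.replicate (num_layers - t).toNat false

-- ===== PRECONDITION & SPEC =====
def Spec_layer_parse (max_trainable_layer : Int) (num_layers : Int) (out : List Bool) : Prop := out = layer_parse_alt max_trainable_layer num_layers
instance (max_trainable_layer : Int) (num_layers : Int) (out : List Bool) : Decidable (Spec_layer_parse max_trainable_layer num_layers out) := by unfold Spec_layer_parse; infer_instance

-- ===== CLAIM (what is proved, stated in full; the proofs are below) =====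
def Claim_equal_layer_parse : Prop := ∀ (max_trainable_layer : Int) (num_layers : Int), Dom_layer_parse max_trainable_layer num_layers → Spec_layer_parse max_trainable_layer num_layers (layer_parse max_trainable_layer num_layers)

-- ===== LEMMAS AND PROOFS =====

-- the mapped range of flags equals the clamped-count replication
lemma range_map_decide_lt (m : Int) : ∀ (N : Nat),
    (List.range N).map (fun (k : Nat) => decide ((k : Int) < m)) =
      List.replicate (min N (max 0 m).toNat) true ++ List.replicate (N - min N (max 0 m).toNat) false := by
  intro N
  induction N with
  | zero => simp
  | succ N ih =>
    rw [List.range_succ, List.map_append, ih]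
    simp only [List.map_cons, List.map_nil]
    by_cases h : (N : Int) < m
    · have h1 : min N (max 0 m).toNat = N := by omega
      have h2 : min (N + 1) (max 0 m).toNat = N + 1 := by omega
      rw [h1, h2]
      simp [List.replicate_succ' (n := N), h]
    · have h1 : min N (max 0 m).toNat = min (N + 1) (max 0 m).toNat := by omega
      have h3 : (N + 1) - min (N + 1) (max 0 m).toNat
          = (N - min (N + 1) (max 0 m).toNat) + 1 := by omega
      rw [h1, h3]
      simp [List.replicate_succ' (n := N - min (N + 1) (max 0 m).toNat), h, List.append_assoc]

-- ===== VERDICT (by name: the statement is the Claim_ definition above) =====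
theorem layer_parse_spec : Claim_equal_layer_parse := by
  intro m n _
  show layer_parse m n = layer_parse_alt m n
  unfold layer_parse layer_parse_alt
  have hfun : (fun (acc : List Bool) (i : Int) =>
      if i < m then acc ++ [true] else acc ++ [false]) =
      fun acc i => acc ++ [decide (i < m)] := by
    funext acc i; by_cases h : i < m <;> simp [h]
  rw [hfun, PySem.List.foldl_append_singleton_eq_map, PySem.List.pyRange_one]
  simp only [List.map_map, List.nil_append]
  have hcomp : ((fun i => decide (i < m)) ∘ fun (k : Nat) => 0 + (k : Int))
      = fun (k : Nat) => decide ((k : Int) < m) := by funext k; simp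
  rw [hcomp, range_map_decide_lt m (n - 0).toNat]
  have e1 : min (n - 0).toNat (max 0 m).toNat = (max 0 (min n m)).toNat := by omega
  have e2 : (n - 0).toNat - (max 0 (min n m)).toNat = (n - max 0 (min n m)).toNat := by omega
  rw [e1, e2]
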